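-- pv_equiv track=rewrite | github.com/doomnonius/advent-of-code | 2020/day14.py | recurse
-- ===== SOURCE A (Python) =====
-- def recurse(poss_count, addresses):
-- 		middle = poss_count//2
-- 		first = addresses[0:middle]
-- 		second = addresses[middle:]
-- 		if poss_count == 1:
-- 			return addresses
-- 		for i in range(len(first)):
-- 			first[i].append("0")
-- 		for y in second:
-- 			y.append("1")
-- 		retVal = recurse(middle, addresses[0:middle]) + recurse(middle, addresses[middle:])
-- 		return retVal
-- ===== SOURCE B (Python) =====
-- def recurse(poss_count, addresses):
--     for j, address in enumerate(addresses):
--         c, k = poss_count, j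
--         while c != 1:
--             mid = c // 2
--             if k < mid:
--                 address.append("0")
--             else:
--                 address.append("1")
--                 k -= mid
--             c = mid
--     return addresses
-- ===== Notes on version B (the rewrite author's own statement) =====
-- stated objective: alternative
-- what changed: Replaces the recursive halving over list slices with a single pass over enumerate(addresses) that derives each address's appended bits directly from its index by repeated floor-halving of the count; Pre_ excludes poss_count < 1, where A hits the recursion limit (RecursionError) and B's while loop spins.
import Mathlib
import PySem

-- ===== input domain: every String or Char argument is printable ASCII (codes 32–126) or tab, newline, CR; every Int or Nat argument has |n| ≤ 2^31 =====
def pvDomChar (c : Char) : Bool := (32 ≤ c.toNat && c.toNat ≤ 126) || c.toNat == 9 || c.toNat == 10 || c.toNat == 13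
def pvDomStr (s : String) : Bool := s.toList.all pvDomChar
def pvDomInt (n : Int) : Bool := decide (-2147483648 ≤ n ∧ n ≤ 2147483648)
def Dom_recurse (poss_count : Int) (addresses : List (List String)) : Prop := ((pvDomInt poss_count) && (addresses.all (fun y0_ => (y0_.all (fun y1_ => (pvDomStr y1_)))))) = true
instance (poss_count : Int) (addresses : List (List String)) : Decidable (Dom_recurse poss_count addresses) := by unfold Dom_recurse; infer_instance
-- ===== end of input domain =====

-- B replaces the recursive slicing with one pass computing each address's bits from its index;
-- equivalence is about the RETURN value (both Pythons also append to the argument's element lists in place).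

-- ===== PORT A =====
-- A's appends mutate the element lists shared between `addresses`, `first` and `second`;
-- in value semantics the post-append `addresses` is first' ++ second' (middle ≥ 0 on the reached branch).
def recurse (poss_count : Int) (addresses : List (List String)) : List (List String) :=
  let middle := PySem.Int.floordiv poss_count 2
  let first := PySem.List.slice addresses (some 0) (some middle)
  let second := PySem.List.slice addresses (some middle) none
  if poss_count == 1 then addresses
  else if poss_count ≤ 0 then addresses   -- totality guard only: the Python recursion diverges here (outside Pre_)
  else
    recurse middle (PySem.List.slice ((first.map (fun a => a ++ ["0"])) ++ (second.map (fun a => a ++ ["1"]))) (some 0) (some middle)) ++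
    recurse middle (PySem.List.slice ((first.map (fun a => a ++ ["0"])) ++ (second.map (fun a => a ++ ["1"]))) (some middle) none)
termination_by poss_count.toNat
decreasing_by
  all_goals
    rw [PySem.Int.floordiv_eq_ediv_of_pos (by omega)]
    simp only [beq_iff_eq] at *
    omega

-- ===== PORT B =====
-- the while-loop body of B: the bits appended to the address at (Int) index k, in order
def altBits (c : Int) (k : Int) : List String :=
  if c == 1 then []
  else if c ≤ 0 then []   -- totality guard only: the Python while-loop diverges here (outside Pre_)
  else
    let mid := PySem.Int.floordiv c 2
    if k < mid then "0" :: altBits mid k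
    else "1" :: altBits mid (k - mid)
termination_by c.toNat
decreasing_by
  all_goals
    rw [PySem.Int.floordiv_eq_ediv_of_pos (by omega)]
    simp only [beq_iff_eq] at *
    omega

def recurse_alt (poss_count : Int) (addresses : List (List String)) : List (List String) :=
  (PySem.List.enumerate addresses).map (fun p => p.2 ++ altBits poss_count p.1)

-- ===== PRECONDITION & SPEC =====
-- Pre_ excludes poss_count < 1: there A never reaches the base case and raises RecursionError.
def Pre_recurse (poss_count : Int) (addresses : List (List String)) : Prop := 1 ≤ poss_count
instance (poss_count : Int) (addresses : List (List String)) : Decidable (Pre_recurse poss_count addresses) := by unfold Pre_recurse; infer_instance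
def pvWitness_recurse : Int × List (List String) := (3, [["a"], [], ["b", "c"]])

def Spec_recurse (poss_count : Int) (addresses : List (List String)) (out : List (List String)) : Prop := out = recurse_alt poss_count addresses
instance (poss_count : Int) (addresses : List (List String)) (out : List (List String)) : Decidable (Spec_recurse poss_count addresses out) := by unfold Spec_recurse; infer_instance

-- ===== CLAIM (what is proved, stated in full; the proofs are below) =====
def Claim_equal_recurse : Prop := ∀ (poss_count : Int) (addresses : List (List String)), Dom_recurse poss_count addresses → Pre_recurse poss_count addresses → Spec_recurse poss_count addresses (recurse poss_count addresses)

-- ===== LEMMAS AND PROOFS =====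


-- one-step unfoldings of the two ports
theorem recurse_one (addrs : List (List String)) : recurse 1 addrs = addrs := by
  rw [recurse]; simp

theorem altBits_one (k : Int) : altBits 1 k = [] := by
  rw [altBits]; simp

theorem altBits_step (c k : Int) (h2 : 2 ≤ c) :
    altBits c k =
      (if k < PySem.Int.floordiv c 2 then "0" :: altBits (PySem.Int.floordiv c 2) k
       else "1" :: altBits (PySem.Int.floordiv c 2) (k - PySem.Int.floordiv c 2)) := by
  rw [altBits]
  simp [show (c == 1) = false by simp; omega, show ¬ c ≤ 0 by omega]

theorem recurse_step (c : Int) (h2 : 2 ≤ c) (addrs : List (List String)) :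
    recurse c addrs =
      recurse (PySem.Int.floordiv c 2)
        (PySem.List.slice
          (((PySem.List.slice addrs (some 0) (some (PySem.Int.floordiv c 2))).map (fun a => a ++ ["0"])) ++
           ((PySem.List.slice addrs (some (PySem.Int.floordiv c 2)) none).map (fun a => a ++ ["1"])))
          (some 0) (some (PySem.Int.floordiv c 2))) ++
      recurse (PySem.Int.floordiv c 2)
        (PySem.List.slice
          (((PySem.List.slice addrs (some 0) (some (PySem.Int.floordiv c 2))).map (fun a => a ++ ["0"])) ++
           ((PySem.List.slice addrs (some (PySem.Int.floordiv c 2)) none).map (fun a => a ++ ["1"])))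
          (some (PySem.Int.floordiv c 2)) none) := by
  rw [recurse]
  simp [show (c == 1) = false by simp; omega, show ¬ c ≤ 0 by omega]

theorem take_mixed (t : Nat) (l : List (List String)) (f g : List String → List String) :
    ((l.take t).map f ++ (l.drop t).map g).take t = (l.take t).map f := by
  by_cases h : t ≤ l.length
  · rw [List.take_append_of_le_length (by simp; omega)]
    simp [List.take_take]
  · have hd : l.drop t = [] := by simp; omega
    rw [hd]
    simp [List.take_of_length_le]

theorem drop_mixed (t : Nat) (l : List (List String)) (f g : List String → List String) :
    ((l.take t).map f ++ (l.drop t).map g).drop t = (l.drop t).map g := by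
  by_cases h : t ≤ l.length
  · rw [List.drop_append]
    simp
    omega
  · have hd : l.drop t = [] := by simp; omega
    rw [hd]
    simp

theorem recurse_main (n : Nat) : ∀ (c : Int), c.toNat = n → 1 ≤ c →
    ∀ (addrs : List (List String)),
      recurse c addrs = (PySem.List.enumerate addrs).map (fun p => p.2 ++ altBits c p.1) := by
  induction n using Nat.strong_induction_on with
  | _ n ih =>
    intro c hcn hc addrs
    by_cases h1 : c = 1
    · subst h1
      rw [recurse_one]
      simp [altBits_one, PySem.List.map_snd_enumerate]
    · have h2 : 2 ≤ c := by omega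
      have hmEd : PySem.Int.floordiv c 2 = c / 2 := PySem.Int.floordiv_eq_ediv_of_pos (by omega)
      have hm1 : 1 ≤ PySem.Int.floordiv c 2 := by omega
      have hmlt : PySem.Int.floordiv c 2 < c := by omega
      have hmt : PySem.Int.floordiv c 2 = (((PySem.Int.floordiv c 2).toNat : Nat) : Int) := by omega
      rw [recurse_step c h2, hmt]
      generalize htdef : (PySem.Int.floordiv c 2).toNat = t at *
      have htn : t < n := by omega
      rw [PySem.List.slice_zero_start, PySem.List.slice_to_natCast, PySem.List.slice_from_natCast]
      rw [PySem.List.slice_zero_start, PySem.List.slice_to_natCast, PySem.List.slice_from_natCast]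
      rw [take_mixed, drop_mixed]
      rw [ih t htn ((t:Int)) (by omega) (by omega), ih t htn ((t:Int)) (by omega) (by omega)]
      rw [← hmt]
      apply List.ext_getElem
      · simp [PySem.List.length_enumerate]; omega
      · intro i hiL hiR
        simp only [List.getElem_append, List.getElem_map, PySem.List.getElem_enumerate,
          List.length_map, PySem.List.length_enumerate, List.length_take]
        simp only [zero_add]
        have hlen : i < addrs.length := by
          simpa [PySem.List.length_enumerate] using hiR
        split_ifs with hi
        · have hit : i < t := by omega
          rw [altBits_step c _ h2, if_pos (by rw [hmt]; exact_mod_cast hit)]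
          simp [List.getElem_take, List.append_assoc]
        · have htle : t ≤ i := by omega
          have h3 : t ≤ addrs.length := by omega
          have hmin : min t addrs.length = t := by omega
          simp only [hmin]
          rw [altBits_step c _ h2, if_neg (by rw [hmt]; omega)]
          have hcast : ((i : Int) - PySem.Int.floordiv c 2) = (((i - t : Nat)) : Int) := by
            rw [hmt]; omega
          rw [hcast]
          have hidx : t + (i - t) = i := by omega
          simp [List.getElem_drop, hidx, List.append_assoc]


-- ===== VERDICT (by name: the statement is the Claim_ definition above) =====
theorem recurse_spec : Claim_equal_recurse := by
  intro c addrs _ hpre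
  unfold Spec_recurse recurse_alt
  exact recurse_main c.toNat c rfl hpre addrs
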